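-- pv_equiv track=rewrite | github.com/SRI-International/QC-App-Oriented-Benchmarks | hamlib/generate_pauli_groups.py | restrict_to
-- ===== SOURCE A (Python) =====
-- def restrict_to(
--         pauli: str, qubits: list[int]
-- ) -> str:
--     """Returns the Pauli string restricted to the provided qubits.
--
--     Arguments:
--         pauli: A Pauli string.
--         qubits: A set of qubits.
--
--     Returns:
--         The provided Pauli string acting only on the provided qubits.
--         Note: This could potentially be empty (identity).
--     """
--     new_pauli_strings = ''
--     for idx, p in enumerate(pauli):
--         if idx in qubits:
--             new_pauli_strings += p
--     return new_pauli_strings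
-- ===== SOURCE B (Python) =====
-- def restrict_to(
--         pauli: str, qubits: list[int]
-- ) -> str:
--     """Gather the selected characters directly: iterate over the sorted set of
--     distinct in-range qubit indices and index into pauli."""
--     return ''.join(pauli[i] for i in sorted(set(qubits)) if 0 <= i < len(pauli))
-- ===== Notes on version B (the rewrite author's own statement) =====
-- stated objective: faster
-- what changed: Instead of enumerating every character of pauli and doing a linear 'idx in qubits' membership scan per position, B sorts the distinct qubit indices once and gathers pauli[i] for each in-range index.
import Mathlib
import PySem

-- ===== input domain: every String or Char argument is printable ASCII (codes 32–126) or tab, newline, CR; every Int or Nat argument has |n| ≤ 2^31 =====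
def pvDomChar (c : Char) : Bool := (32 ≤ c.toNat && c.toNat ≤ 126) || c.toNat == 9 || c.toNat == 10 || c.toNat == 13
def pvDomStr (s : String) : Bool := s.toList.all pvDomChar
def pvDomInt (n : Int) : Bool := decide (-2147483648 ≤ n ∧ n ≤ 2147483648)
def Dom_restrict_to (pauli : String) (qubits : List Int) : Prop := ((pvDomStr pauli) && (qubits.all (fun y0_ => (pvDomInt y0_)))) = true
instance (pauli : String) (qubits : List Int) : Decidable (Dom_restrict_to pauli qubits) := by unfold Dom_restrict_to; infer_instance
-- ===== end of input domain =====

-- B replaces A's scan of every pauli character with a gather over the sorted set of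
-- in-range qubit indices (objective: alternative decomposition, same result).

-- ===== PORT A =====
-- Literal port of A: for idx, p in enumerate(pauli): if idx in qubits: acc += p
def restrict_to (pauli : String) (qubits : List Int) : String :=
  String.ofList ((PySem.List.enumerate pauli.toList 0).foldl
    (fun acc ip => if ip.1 ∈ qubits then acc ++ [ip.2] else acc) [])

-- ===== PORT B =====
-- Port of B: ''.join(pauli[i] for i in sorted(set(qubits)) if 0 <= i < len(pauli))
def restrict_to_alt (pauli : String) (qubits : List Int) : String :=
  let sel := PySem.List.sorted (PySem.Set.ofList qubits) (fun x => x) false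
  String.ofList ((sel.filter (fun i => decide (0 ≤ i) && decide (i < (pauli.toList.length : Int)))).map
    (fun i => PySem.List.pyGetD pauli.toList i ' '))

-- ===== PRECONDITION & SPEC =====
def Spec_restrict_to (pauli : String) (qubits : List Int) (out : String) : Prop := out = restrict_to_alt pauli qubits
instance (pauli : String) (qubits : List Int) (out : String) : Decidable (Spec_restrict_to pauli qubits out) := by unfold Spec_restrict_to; infer_instance

-- ===== CLAIM (what is proved, stated in full; the proofs are below) =====
def Claim_equal_restrict_to : Prop := ∀ (pauli : String) (qubits : List Int), Dom_restrict_to pauli qubits → Spec_restrict_to pauli qubits (restrict_to pauli qubits)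

-- ===== LEMMAS AND PROOFS =====

-- Both programs select, in ascending index order, exactly the characters whose
-- position is a member of qubits; the two index lists are strictly increasing
-- permutations of each other, hence equal.
theorem restrict_lists_eq (pauli : String) (qubits : List Int) :
    (PySem.List.enumerate pauli.toList 0).foldl
      (fun acc ip => if ip.1 ∈ qubits then acc ++ [ip.2] else acc) []
    = ((PySem.List.sorted (PySem.Set.ofList qubits) (fun x => x) false).filter
        (fun i => decide (0 ≤ i) && decide (i < (pauli.toList.length : Int)))).map
        (fun i => PySem.List.pyGetD pauli.toList i ' ') := by
  set cs := pauli.toList with hcs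
  rw [PySem.List.foldl_append_ite (p := fun ip : Int × Char => ip.1 ∈ qubits) (f := fun ip => ip.2),
      List.nil_append, PySem.List.enumerate_eq_map_pyRange cs ' ', List.filter_map, List.map_map]
  have hI : ((PySem.List.pyRange 0 (cs.length : Int) 1).filter
      (fun j => decide (j ∈ qubits)))
      = ((PySem.List.sorted (PySem.Set.ofList qubits) (fun x => x) false).filter
        (fun i => decide (0 ≤ i) && decide (i < (cs.length : Int)))) := by
    have p1 : ((PySem.List.pyRange 0 (cs.length : Int) 1).filter
        (fun j => decide (j ∈ qubits))).Pairwise (· < ·) :=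
      (PySem.List.pairwise_lt_pyRange_one 0 (cs.length : Int)).filter _
    have p2 : ((PySem.List.sorted (PySem.Set.ofList qubits) (fun x => x) false).filter
        (fun i => decide (0 ≤ i) && decide (i < (cs.length : Int)))).Pairwise (· < ·) :=
      (PySem.List.sorted_ofList_pairwise_lt qubits).filter _
    have perm : ((PySem.List.pyRange 0 (cs.length : Int) 1).filter
        (fun j => decide (j ∈ qubits))).Perm
        ((PySem.List.sorted (PySem.Set.ofList qubits) (fun x => x) false).filter
        (fun i => decide (0 ≤ i) && decide (i < (cs.length : Int)))) := by
      refine (List.perm_ext_iff_of_nodup (p1.imp ne_of_lt) (p2.imp ne_of_lt)).mpr ?_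
      intro a
      simp [List.mem_filter, PySem.List.mem_pyRange_one, PySem.List.mem_sorted,
        PySem.Set.mem_ofList]
      tauto
    exact PySem.List.eq_of_perm_of_pairwise_le_of_injective (fun x => x)
      (fun a b h => h) perm (p1.imp le_of_lt) (p2.imp le_of_lt)
  rw [← hI]
  congr 1

-- ===== VERDICT (by name: the statement is the Claim_ definition above) =====
theorem restrict_to_spec : Claim_equal_restrict_to := by
  intro pauli qubits _
  unfold Spec_restrict_to restrict_to restrict_to_alt
  exact congrArg String.ofList (restrict_lists_eq pauli qubits)
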